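-- pv_equiv track=rewrite | github.com/asrinivasan75/Range | packages/solver/slumbot.py | _count_actions_on_current_street
-- ===== SOURCE A (Python) =====
-- def _count_actions_on_current_street(action_str: str) -> int:
--     """Count how many player actions have been taken on the current street."""
--     # Find the last street separator
--     last_sep = action_str.rfind('/')
--     current = action_str[last_sep+1:] if last_sep >= 0 else action_str
--     # Count non-separator actions
--     count = 0
--     i = 0
--     while i < len(current):
--         c = current[i]
--         if c == 'b':
--             j = i + 1
--             while j < len(current) and current[j].isdigit():
--                 j += 1
--             count += 1
--             i = j
--         elif c in 'kcf':
--             count += 1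
--             i += 1
--         else:
--             i += 1
--     return count
-- ===== SOURCE B (Python) =====
-- def _count_actions_on_current_street(action_str: str) -> int:
--     """Count how many player actions have been taken on the current street."""
--     last_sep = action_str.rfind('/')
--     current = action_str[last_sep+1:] if last_sep >= 0 else action_str
--     return sum(1 for c in current if c in 'bkcf')
-- ===== Notes on version B (the rewrite author's own statement) =====
-- stated objective: simpler
-- what changed: Replaces the index-based while loop with an inner digit-skipping loop by a single comprehension counting action characters (digits after a bet are never counted anyway, so the skip is unnecessary).
import Mathlib
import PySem

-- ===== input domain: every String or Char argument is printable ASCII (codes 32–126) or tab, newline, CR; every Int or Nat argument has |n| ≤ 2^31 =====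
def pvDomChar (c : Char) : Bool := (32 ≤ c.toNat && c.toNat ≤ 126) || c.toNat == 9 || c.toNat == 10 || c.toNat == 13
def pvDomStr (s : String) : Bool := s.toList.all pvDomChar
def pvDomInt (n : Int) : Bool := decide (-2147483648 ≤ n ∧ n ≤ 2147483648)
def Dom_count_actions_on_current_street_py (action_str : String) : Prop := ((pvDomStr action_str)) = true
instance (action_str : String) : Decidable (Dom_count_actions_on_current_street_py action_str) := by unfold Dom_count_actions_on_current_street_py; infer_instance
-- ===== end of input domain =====

-- B replaces A's index-based loop (with an inner digit-skipping loop) by a single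
-- count of the characters 'b','k','c','f' in the current street; objective: simpler.

-- ===== PORT A =====
-- inner while: 'while j < len(current) and current[j].isdigit(): j += 1' (skips the digit prefix)
def pvASkipDigits : List Char → List Char
  | [] => []
  | c :: rest => if PySem.Chars.isdigit c then pvASkipDigits rest else c :: rest

theorem pvASkipDigits_length_le (l : List Char) : (pvASkipDigits l).length ≤ l.length := by
  induction l with
  | nil => simp [pvASkipDigits]
  | cons c rest ih =>
    simp only [pvASkipDigits]
    split
    · exact Nat.le_succ_of_le ih
    · simp

-- outer while over the remaining characters, carrying 'count'
def pvALoop : List Char → Int → Int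
  | [], count => count
  | c :: rest, count =>
    if c == 'b' then pvALoop (pvASkipDigits rest) (count + 1)
    else if c == 'k' || c == 'c' || c == 'f' then pvALoop rest (count + 1)
    else pvALoop rest count
termination_by l _ => l.length
decreasing_by
  · exact Nat.lt_succ_of_le (pvASkipDigits_length_le rest)
  · simp
  · simp

def count_actions_on_current_street_py (action_str : String) : Int :=
  let s := action_str.toList
  let last_sep := PySem.Chars.rfind s ['/']
  let current := if last_sep ≥ 0 then PySem.List.slice s (some (last_sep + 1)) none else s
  pvALoop current 0

-- ===== PORT B =====
def count_actions_on_current_street_py_alt (action_str : String) : Int :=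
  let s := action_str.toList
  let last_sep := PySem.Chars.rfind s ['/']
  let current := if last_sep ≥ 0 then PySem.List.slice s (some (last_sep + 1)) none else s
  (current.countP (fun c => c == 'b' || c == 'k' || c == 'c' || c == 'f') : Int)

-- ===== PRECONDITION & SPEC =====
def Spec_count_actions_on_current_street_py (action_str : String) (out : Int) : Prop := out = count_actions_on_current_street_py_alt action_str
instance (action_str : String) (out : Int) : Decidable (Spec_count_actions_on_current_street_py action_str out) := by unfold Spec_count_actions_on_current_street_py; infer_instance

-- ===== CLAIM (what is proved, stated in full; the proofs are below) =====
def Claim_equal_count_actions_on_current_street_py : Prop := ∀ (action_str : String), Dom_count_actions_on_current_street_py action_str → Spec_count_actions_on_current_street_py action_str (count_actions_on_current_street_py action_str)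

-- ===== LEMMAS AND PROOFS =====
def pvActP (c : Char) : Bool := c == 'b' || c == 'k' || c == 'c' || c == 'f'

theorem pvActP_false_of_digit {c : Char} (h : PySem.Chars.isdigit c = true) :
    pvActP c = false := by
  by_contra hne
  have hp : pvActP c = true := by
    cases hb : pvActP c
    · exact absurd hb hne
    · rfl
  simp only [pvActP, Bool.or_eq_true, beq_iff_eq] at hp
  rcases hp with ((h1 | h1) | h1) | h1 <;> subst h1 <;> simp [PySem.Chars.isdigit] at h

theorem countP_pvASkipDigits (l : List Char) :
    (pvASkipDigits l).countP pvActP = l.countP pvActP := by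
  induction l with
  | nil => rfl
  | cons c rest ih =>
    simp only [pvASkipDigits]
    split
    · rename_i hd
      rw [ih, List.countP_cons, pvActP_false_of_digit hd]
      simp
    · rfl

theorem pvALoop_eq (l : List Char) (n : Int) :
    pvALoop l n = n + (l.countP pvActP : Int) := by
  fun_induction pvALoop l n with
  | case1 n => simp
  | case2 c rest n hb ih =>
      rw [ih, countP_pvASkipDigits, List.countP_cons]
      have : pvActP c = true := by simp [pvActP, hb]
      rw [this]
      simp
      ring
  | case3 c rest n hb hkcf ih =>
      rw [ih, List.countP_cons]
      have : pvActP c = true := by simp only [pvActP, hb, Bool.false_or]; exact hkcf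
      rw [this]
      simp
      ring
  | case4 c rest n hb hkcf ih =>
      rw [ih, List.countP_cons]
      have : pvActP c = false := by simp only [pvActP, hb, Bool.false_or]; simpa using hkcf
      rw [this]
      simp

-- ===== VERDICT (by name: the statement is the Claim_ definition above) =====
theorem count_actions_on_current_street_py_spec : Claim_equal_count_actions_on_current_street_py := by
  intro s _
  unfold Spec_count_actions_on_current_street_py
  unfold count_actions_on_current_street_py count_actions_on_current_street_py_alt
  simp only [pvALoop_eq]
  simp only [Int.zero_add]
  rfl
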